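-- pv_equiv track=rewrite | github.com/kkr010128/codebert | problem235/problem235_116.py | lcm_mod
-- ===== SOURCE A (Python) =====
-- from collections import Counter, defaultdict
--
-- def prime_factors(n):
--     i = 2
--     while i * i <= n:
--         if n % i:
--             i += 1
--         else:
--             n //= i
--             yield i
--     if n > 1:
--         yield n
--
-- def modpow(a,n,m):
--     res = 1
--     t = a
--     while n:
--         if n%2:
--             res = (res*t)%m
--         t = (t*t)%m
--         n //= 2
--     return res
--
-- def lcm_mod(nums, mod):
--     p = defaultdict(int)
--     for n in nums:
--         c = Counter(prime_factors(n))
--         for v,cnt in c.items():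
--             p[v] = max(p[v],cnt)
--
--     res = 1
--     for v,cnt in p.items():
--         res *= modpow(v,cnt,mod)
--         res %= mod
--     return res
-- ===== SOURCE B (Python) =====
-- import math
--
-- def lcm_mod(nums, mod):
--     l = 1
--     for n in nums:
--         if n > 1:
--             l = l // math.gcd(l, n) * n
--     return l % mod if l > 1 else 1
-- ===== Notes on version B (the rewrite author's own statement) =====
-- stated objective: simpler
-- what changed: Replaced the prime-factorization/max-exponent dictionary plus binary modular exponentiation with a single Euclidean pass that accumulates lcm via l // gcd(l, n) * n over the n > 1 and reduces once at the end.
import Mathlib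
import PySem

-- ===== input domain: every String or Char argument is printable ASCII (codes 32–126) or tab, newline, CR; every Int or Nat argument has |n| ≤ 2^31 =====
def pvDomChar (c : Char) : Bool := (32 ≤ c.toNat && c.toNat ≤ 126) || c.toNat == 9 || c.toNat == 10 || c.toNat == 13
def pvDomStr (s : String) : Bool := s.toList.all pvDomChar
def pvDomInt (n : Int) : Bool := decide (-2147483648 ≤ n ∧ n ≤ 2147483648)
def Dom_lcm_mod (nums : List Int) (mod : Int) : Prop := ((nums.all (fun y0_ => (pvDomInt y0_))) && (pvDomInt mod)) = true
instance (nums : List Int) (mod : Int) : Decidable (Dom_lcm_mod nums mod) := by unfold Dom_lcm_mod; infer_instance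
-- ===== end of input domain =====

-- B replaces A's prime-factorization/max-exponent dictionary with a single Euclidean
-- lcm pass (l = l // gcd(l, n) * n over the n > 1), reduced modulo mod once at the end:
-- simpler (objective: simpler).

-- ===== PORT A =====
-- prime_factors(n): trial division ('while i*i <= n: ...; if n > 1: yield n').
-- The loop is ported with a fuel bound on the iteration count (each step divides n by
-- i ≥ 2 or increments i, so (2n - i).toNat iterations always suffice; primeFactorsA
-- passes enough fuel, see pfAux_dec1/pfAux_dec2 and primeFactorsA_eq).
def pfAux : Nat → Int → Int → List Int
  | 0, _, _ => []
  | fuel + 1, i, n =>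
    if i * i ≤ n then
      if PySem.Int.mod n i = 0 then
        i :: pfAux fuel i (PySem.Int.floordiv n i)
      else
        pfAux fuel (i + 1) n
    else
      if 1 < n then [n] else []

def primeFactorsA (n : Int) : List Int := pfAux (2 * n).toNat 2 n

-- modpow(a, n, m): binary exponentiation; Python's 'while n: ... n //= 2' is mirrored on
-- the Nat n.toNat (exact for n ≥ 0; A only calls it with positive prime multiplicities —
-- Python's loop would not terminate for n < 0).
def modpowAux (res t : Int) (k : Nat) (m : Int) : Int :=
  if h : k ≠ 0 then
    modpowAux (if k % 2 ≠ 0 then PySem.Int.mod (res * t) m else res)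
      (PySem.Int.mod (t * t) m) (k / 2) m
  else res
termination_by k
decreasing_by exact Nat.div_lt_self (Nat.pos_of_ne_zero h) Nat.one_lt_two

def modpow (a n m : Int) : Int := modpowAux 1 a n.toNat m

def lcm_mod (nums : List Int) (mod : Int) : Int :=
  let p : PySem.Dict Int Int :=
    nums.foldl (fun p n =>
      (PySem.Dict.counter (primeFactorsA n)).items.foldl
        (fun p vc => p.insert vc.1 (max (p.getD vc.1 0) vc.2)) p)
      PySem.Dict.empty
  p.items.foldl (fun res vc => PySem.Int.mod (res * modpow vc.1 vc.2 mod) mod) 1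

-- ===== PORT B =====
def lcm_mod_alt (nums : List Int) (mod : Int) : Int :=
  let l : Int :=
    nums.foldl (fun l n => if 1 < n then PySem.Int.floordiv l (Int.gcd l n) * n else l) 1
  if 1 < l then PySem.Int.mod l mod else 1

-- ===== PRECONDITION & SPEC =====
-- Pre_ excludes exactly the inputs where Python A raises ZeroDivisionError:
-- mod = 0 together with at least one n > 1 (then modpow reduces modulo 0); B raises there too.
def Pre_lcm_mod (nums : List Int) (mod : Int) : Prop := mod ≠ 0 ∨ ∀ n ∈ nums, n ≤ 1
instance (nums : List Int) (mod : Int) : Decidable (Pre_lcm_mod nums mod) := by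
  unfold Pre_lcm_mod; infer_instance

def pvWitness_lcm_mod : List Int × Int := ([4, 6, 10], 7)

def Spec_lcm_mod (nums : List Int) (mod : Int) (out : Int) : Prop := out = lcm_mod_alt nums mod
instance (nums : List Int) (mod : Int) (out : Int) : Decidable (Spec_lcm_mod nums mod out) := by
  unfold Spec_lcm_mod; infer_instance

-- ===== CLAIM (what is proved, stated in full; the proofs are below) =====
def Claim_equal_lcm_mod : Prop := ∀ (nums : List Int) (mod : Int), Dom_lcm_mod nums mod → Pre_lcm_mod nums mod → Spec_lcm_mod nums mod (lcm_mod nums mod)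

-- ===== LEMMAS AND PROOFS =====

-- Python '%' respects congruence: x % m only depends on x modulo m.
theorem pymod_modEq (a m : Int) : PySem.Int.mod a m ≡ a [ZMOD m] := by
  have h := PySem.Int.floordiv_mul_add_mod a m
  refine Int.modEq_iff_dvd.mpr ⟨PySem.Int.floordiv a m, ?_⟩
  linarith [mul_comm m (PySem.Int.floordiv a m)]

theorem pymod_congr {m a b : Int} (hm : m ≠ 0) (h : a ≡ b [ZMOD m]) :
    PySem.Int.mod a m = PySem.Int.mod b m := by
  have hab : PySem.Int.mod a m ≡ PySem.Int.mod b m [ZMOD m] :=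
    ((pymod_modEq a m).trans h).trans (pymod_modEq b m).symm
  obtain ⟨j, hj⟩ := Int.ModEq.dvd hab
  rcases lt_or_gt_of_ne hm with hneg | hpos
  · obtain ⟨h1a, h2a⟩ := PySem.Int.mod_neg_bounds a hneg
    obtain ⟨h1b, h2b⟩ := PySem.Int.mod_neg_bounds b hneg
    have hj0 : j = 0 := by
      rcases lt_trichotomy j 0 with hc | hc | hc
      · nlinarith
      · exact hc
      · nlinarith
    rw [hj0] at hj; omega
  · have h1a := PySem.Int.mod_nonneg a hpos
    have h2a := PySem.Int.mod_lt a hpos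
    have h1b := PySem.Int.mod_nonneg b hpos
    have h2b := PySem.Int.mod_lt b hpos
    have hj0 : j = 0 := by
      rcases lt_trichotomy j 0 with hc | hc | hc
      · nlinarith
      · exact hc
      · nlinarith
    rw [hj0] at hj; omega

theorem modpowAux_eq (m : Int) (hm : m ≠ 0) :
    ∀ (k : Nat), 1 ≤ k → ∀ (res t : Int),
      modpowAux res t k m = PySem.Int.mod (res * t ^ k) m := by
  intro k
  induction k using Nat.strong_induction_on with
  | _ k ih =>
    intro hk res t
    rw [modpowAux]
    rw [dif_pos (by omega : k ≠ 0)]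
    by_cases hj : k / 2 = 0
    · have hk1 : k = 1 := by omega
      subst hk1
      rw [modpowAux]
      norm_num
    · rw [ih (k / 2) (by omega) (by omega)]
      set e := k / 2 with he
      have c2 : (PySem.Int.mod (t * t) m) ^ e ≡ (t * t) ^ e [ZMOD m] :=
        (pymod_modEq (t * t) m).pow e
      by_cases hod : k % 2 ≠ 0
      · rw [if_pos hod]
        apply pymod_congr hm
        have h1 : PySem.Int.mod (res * t) m * (PySem.Int.mod (t * t) m) ^ e
            ≡ (res * t) * (t * t) ^ e [ZMOD m] :=
          Int.ModEq.mul (pymod_modEq _ m) c2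
        have h2 : (res * t) * (t * t) ^ e = res * t ^ k := by
          have hke : k = 2 * e + 1 := by omega
          rw [hke]; ring
        rw [← h2]; exact h1
      · rw [if_neg hod]
        apply pymod_congr hm
        have h1 : res * (PySem.Int.mod (t * t) m) ^ e
            ≡ res * (t * t) ^ e [ZMOD m] := Int.ModEq.mul (Int.ModEq.refl res) c2
        have h2 : res * (t * t) ^ e = res * t ^ k := by
          have hke : k = 2 * e := by omega
          rw [hke]; ring
        rw [← h2]; exact h1

theorem modpow_eq (a c m : Int) (hc : 1 ≤ c) (hm : m ≠ 0) :
    modpow a c m = PySem.Int.mod (a ^ c.toNat) m := by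
  unfold modpow
  rw [modpowAux_eq m hm c.toNat (by omega) 1 a, one_mul]

theorem pfAux_dec1 (i n : Int) (hi : 2 ≤ i) (h : i * i ≤ n) (hm : PySem.Int.mod n i = 0) :
    (2 * PySem.Int.floordiv n i - i).toNat < (2 * n - i).toNat := by
  have hdvd : i ∣ n := (PySem.Int.mod_eq_zero_iff_dvd n i).mp hm
  rw [PySem.Int.floordiv_eq_ediv_of_pos (by omega)]
  obtain ⟨q, hq⟩ := hdvd
  have hq' : n / i = q := by rw [hq]; exact Int.mul_ediv_cancel_left q (by omega)
  rw [hq']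
  have h2 : i ≤ q := by nlinarith
  have h3 : 2 * q ≤ n := by nlinarith
  omega

theorem pfAux_dec2 (i n : Int) (hi : 2 ≤ i) (h : i * i ≤ n) :
    (2 * n - (i + 1)).toNat < (2 * n - i).toNat := by
  have h2 : 2 * i ≤ i * i := by nlinarith
  omega

theorem pfAux_eq : ∀ (fuel : Nat) (i n : Int), 2 ≤ i → (2 * n - i).toNat < fuel →
    (n ≤ 1 ∨ (2 ≤ n ∧ i ≤ (Nat.minFac n.toNat : Int))) →
    pfAux fuel i n = (Nat.primeFactorsList n.toNat).map (fun q : ℕ => (q : Int)) := by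
  intro fuel
  induction fuel with
  | zero => intro i n _ hf _; omega
  | succ f ih =>
    intro i n hi hf hinv
    by_cases h : i * i ≤ n
    · by_cases hm : PySem.Int.mod n i = 0
      · have hn4 : 4 ≤ n := by nlinarith
        rcases hinv with h1 | ⟨h2, hmin⟩
        · omega
        have hdvd : i ∣ n := (PySem.Int.mod_eq_zero_iff_dvd n i).mp hm
        have hiN : ((i.toNat : ℤ)) = i := Int.toNat_of_nonneg (by omega)
        have hnN : ((n.toNat : ℤ)) = n := Int.toNat_of_nonneg (by omega)
        have hdvdN : i.toNat ∣ n.toNat := by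
          rw [← Int.natCast_dvd_natCast, hiN, hnN]; exact hdvd
        have hEq : Nat.minFac n.toNat = i.toNat := by
          have hminle : Nat.minFac n.toNat ≤ i.toNat := Nat.minFac_le_of_dvd (by omega) hdvdN
          omega
        have hNmul : i.toNat * i.toNat ≤ n.toNat := by
          have h' := h
          rw [← hiN, ← hnN] at h'
          exact_mod_cast h'
        have hfd : PySem.Int.floordiv n i = ((n.toNat / i.toNat : ℕ) : ℤ) := by
          rw [PySem.Int.floordiv_eq_ediv_of_pos (by omega : (0:ℤ) < i), ← hiN, ← hnN]
          norm_cast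
        have hge : i.toNat ≤ n.toNat / i.toNat := (Nat.le_div_iff_mul_le (by omega)).mpr hNmul
        have hinv' : PySem.Int.floordiv n i ≤ 1 ∨
            (2 ≤ PySem.Int.floordiv n i ∧ i ≤ (Nat.minFac (PySem.Int.floordiv n i).toNat : Int)) := by
          right
          have hq : n.toNat / i.toNat ∣ n.toNat := Nat.div_dvd_of_dvd hdvdN
          have hne1 : n.toNat / i.toNat ≠ 1 := by omega
          have hp := Nat.minFac_prime hne1
          have hdv : Nat.minFac (n.toNat / i.toNat) ∣ n.toNat := (Nat.minFac_dvd _).trans hq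
          have hle := Nat.minFac_le_of_dvd hp.two_le hdv
          rw [hfd]
          constructor
          · omega
          · simp only [Int.toNat_natCast]
            omega
        have hfuel' : (2 * PySem.Int.floordiv n i - i).toNat < f := by
          have := pfAux_dec1 i n hi h hm
          omega
        rw [pfAux, if_pos h, if_pos hm, ih i (PySem.Int.floordiv n i) hi hfuel' hinv']
        obtain ⟨r, hr⟩ : ∃ r, n.toNat = r + 2 := ⟨n.toNat - 2, by omega⟩
        rw [hr, Nat.primeFactorsList_add_two, ← hr, hEq, hfd]
        simp [hiN]
        have hediv : n / i = ((n.toNat / i.toNat : ℕ) : ℤ) := by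
          rw [← PySem.Int.floordiv_eq_ediv_of_pos (by omega : (0:ℤ) < i)]
          exact hfd
        rw [show max n 0 = n from max_eq_left (by omega), hediv, Int.toNat_natCast]
      · have hn4 : 4 ≤ n := by nlinarith
        rcases hinv with h1 | ⟨h2, hmin⟩
        · omega
        have hiN : ((i.toNat : ℤ)) = i := Int.toNat_of_nonneg (by omega)
        have hnN : ((n.toNat : ℤ)) = n := Int.toNat_of_nonneg (by omega)
        have hndvd : ¬ (i ∣ n) := fun hd => hm ((PySem.Int.mod_eq_zero_iff_dvd n i).mpr hd)
        have hne : Nat.minFac n.toNat ≠ i.toNat := by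
          intro hEq
          apply hndvd
          have hmf := Nat.minFac_dvd n.toNat
          rw [hEq] at hmf
          rw [← hiN, ← hnN]
          exact_mod_cast hmf
        have hfuel' : (2 * n - (i + 1)).toNat < f := by
          have := pfAux_dec2 i n hi h
          omega
        rw [pfAux, if_pos h, if_neg hm]
        apply ih (i + 1) n (by omega) hfuel'
        right
        exact ⟨h2, by omega⟩
    · by_cases h1 : 1 < n
      · rcases hinv with hx | ⟨h2, hmin⟩
        · omega
        have hnN : ((n.toNat : ℤ)) = n := Int.toNat_of_nonneg (by omega)
        have hp : Nat.Prime n.toNat := by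
          by_contra hnp
          have hsq := Nat.minFac_sq_le_self (by omega : 0 < n.toNat) hnp
          rw [pow_two] at hsq
          apply h
          have h4 : ((Nat.minFac n.toNat : ℕ) : ℤ) * ((Nat.minFac n.toNat : ℕ) : ℤ) ≤ ((n.toNat : ℕ) : ℤ) := by
            exact_mod_cast hsq
          nlinarith
        rw [pfAux, if_neg h, if_pos h1, Nat.primeFactorsList_prime hp]
        simp [hnN]
      · have hN : n.toNat = 0 ∨ n.toNat = 1 := by omega
        rw [pfAux, if_neg h, if_neg h1]
        rcases hN with h0 | h0 <;> rw [h0] <;> simp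

theorem primeFactorsA_eq (n : Int) :
    primeFactorsA n = (Nat.primeFactorsList n.toNat).map (fun q : ℕ => (q : Int)) := by
  unfold primeFactorsA
  by_cases hn : n ≤ 0
  · have hfuel : (2 * n).toNat = 0 := by omega
    have hN : n.toNat = 0 := by omega
    rw [hfuel, hN, pfAux]
    simp
  · refine pfAux_eq (2 * n).toNat 2 n (le_refl 2) (by omega) ?_
    by_cases h : n ≤ 1
    · exact Or.inl h
    · refine Or.inr ⟨by omega, ?_⟩
      have h2 : n.toNat ≠ 1 := by omega
      have := (Nat.minFac_prime h2).two_le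
      omega

-- the inner dictionary loop: getD after folding max-inserts over distinct keys
theorem foldl_insert_max_getD (s : List Int) (f : Int → Int) :
    ∀ (d : PySem.Dict Int Int), s.Nodup → ∀ (w : Int),
      ((s.map (fun k => (k, f k))).foldl
          (fun d vc => d.insert vc.1 (max (d.getD vc.1 0) vc.2)) d).getD w 0
        = if w ∈ s then max (d.getD w 0) (f w) else d.getD w 0 := by
  induction s with
  | nil => intro d _ w; simp
  | cons k t ih =>
    intro d hnd w
    simp only [List.map_cons, List.foldl_cons]
    rw [ih _ (List.nodup_cons.mp hnd).2 w]
    by_cases hw : w ∈ t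
    · have hwk : w ≠ k := fun hh => (List.nodup_cons.mp hnd).1 (hh ▸ hw)
      rw [if_pos hw, if_pos (by simp [hw]), PySem.Dict.getD_insert, if_neg hwk]
    · by_cases hwk : w = k
      · subst hwk
        rw [if_neg hw, if_pos (by simp), PySem.Dict.getD_insert, if_pos rfl]
      · rw [if_neg hw, if_neg (by simp [hwk, hw]), PySem.Dict.getD_insert, if_neg hwk]

-- the abstract Nat-side state: lcm of the processed n > 1
def lstep (L : ℕ) (n : Int) : ℕ := if 1 < n then Nat.lcm L n.toNat else L

-- dictionary invariant: p holds exactly the factorization of L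
def DInv (p : PySem.Dict Int Int) (L : ℕ) : Prop :=
  p.keys.Nodup ∧ 0 < L ∧ (∀ v ∈ p.keys, 2 ≤ v) ∧
    (∀ v ∈ p.keys, p.getD v 0 = ((Nat.factorization L) v.toNat : Int)) ∧
    (∀ q : ℕ, q ∈ L.primeFactors ↔ (q : Int) ∈ p.keys)

theorem inner_preserves (p : PySem.Dict Int Int) (L : ℕ) (n : Int) (h : DInv p L) :
    DInv ((PySem.Dict.counter (primeFactorsA n)).items.foldl
        (fun p vc => p.insert vc.1 (max (p.getD vc.1 0) vc.2)) p)
      (lstep L n) := by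
  obtain ⟨hnd, hL, hge2, hval, hiff⟩ := h
  by_cases h1 : 1 < n
  case neg =>
    have hitems0 : (PySem.Dict.counter (primeFactorsA n)).items = [] := by
      have hpf : primeFactorsA n = [] := by
        rw [primeFactorsA_eq]
        have hN : n.toNat = 0 ∨ n.toNat = 1 := by omega
        rcases hN with h0 | h0 <;> rw [h0] <;> simp
      rw [hpf]
      rfl
    rw [hitems0]
    unfold lstep
    rw [if_neg h1]
    exact ⟨hnd, hL, hge2, hval, hiff⟩
  case pos =>
    have hN2 : 2 ≤ n.toNat := by omega
    have hLne : L ≠ 0 := by omega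
    have hNne : n.toNat ≠ 0 := by omega
    have hnN : ((n.toNat : ℤ)) = n := Int.toNat_of_nonneg (by omega)
    unfold lstep
    rw [if_pos h1]
    set pfn := primeFactorsA n with hpfn
    -- facts about pfn
    have hpfn_eq : pfn = (Nat.primeFactorsList n.toNat).map (fun q : ℕ => (q : Int)) :=
      primeFactorsA_eq n
    have hmem_pfn : ∀ v : Int, v ∈ pfn ↔ ∃ q ∈ Nat.primeFactorsList n.toNat, (q : Int) = v := by
      intro v; rw [hpfn_eq]; simp
    have hge2_pfn : ∀ v ∈ pfn, 2 ≤ v := by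
      intro v hv
      obtain ⟨q, hq, rfl⟩ := (hmem_pfn v).mp hv
      exact_mod_cast (Nat.prime_of_mem_primeFactorsList hq).two_le
    have hcount : ∀ q : ℕ, pfn.count ((q : Int)) = ((Nat.primeFactorsList n.toNat).count q : Int) := by
      intro q
      rw [hpfn_eq]
      rw [List.count_map_of_injective _ _ (fun a b => by omega) q]
    have hmemN : ∀ q : ℕ, q ∈ Nat.primeFactorsList n.toNat ↔ q ∈ (n.toNat).primeFactors := by
      intro q
      rw [Nat.mem_primeFactorsList hNne, Nat.mem_primeFactors]
      constructor
      · rintro ⟨hp, hd⟩; exact ⟨hp, hd, hNne⟩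
      · rintro ⟨hp, hd, _⟩; exact ⟨hp, hd⟩
    -- the folded dictionary
    have hitems : (PySem.Dict.counter pfn).items
        = (PySem.Set.ofList pfn).map (fun k => (k, (pfn.count k : Int))) :=
      PySem.Dict.items_counter pfn
    have hkeys : ((PySem.Dict.counter pfn).items.foldl
        (fun p vc => p.insert vc.1 (max (p.getD vc.1 0) vc.2)) p).keys
        = PySem.Set.update p.keys ((PySem.Dict.counter pfn).items.map Prod.fst) :=
      PySem.Dict.keys_foldl_insert_key _ _ _ _
    have hkeymap : ((PySem.Dict.counter pfn).items.map Prod.fst) = PySem.Set.ofList pfn := by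
      rw [hitems, List.map_map]
      simp only [Function.comp_def]
      exact List.map_id' _
    have hgetD : ∀ w : Int, ((PySem.Dict.counter pfn).items.foldl
        (fun p vc => p.insert vc.1 (max (p.getD vc.1 0) vc.2)) p).getD w 0
        = if w ∈ PySem.Set.ofList pfn then max (p.getD w 0) (pfn.count w : Int) else p.getD w 0 := by
      intro w
      rw [hitems]
      exact foldl_insert_max_getD _ _ p (PySem.Set.nodup_ofList pfn) w
    have hmemkeys : ∀ w : Int, w ∈ ((PySem.Dict.counter pfn).items.foldl
        (fun p vc => p.insert vc.1 (max (p.getD vc.1 0) vc.2)) p).keys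
        ↔ w ∈ p.keys ∨ w ∈ pfn := by
      intro w
      rw [hkeys, hkeymap, PySem.Set.mem_update]
      rw [PySem.Set.mem_ofList]
    have hfactlcm := Nat.factorization_lcm hLne hNne
    have hsup : ∀ q : ℕ, (Nat.lcm L n.toNat).factorization q
        = max (L.factorization q) ((n.toNat).factorization q) := by
      intro q
      rw [hfactlcm, Finsupp.sup_apply]
    have hLfact0 : ∀ v : Int, v ∉ p.keys → 2 ≤ v → L.factorization v.toNat = 0 := by
      intro v hv h2v
      have hnp : v.toNat ∉ L.primeFactors := by
        intro hmem
        have := (hiff v.toNat).mp hmem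
        rw [Int.toNat_of_nonneg (by omega)] at this
        exact hv this
      rw [← Nat.support_factorization] at hnp
      exact Finsupp.notMem_support_iff.mp hnp
    have hNfact0 : ∀ v : Int, v ∉ pfn → 2 ≤ v → (n.toNat).factorization v.toNat = 0 := by
      intro v hv h2v
      by_contra hne
      have hc : v.toNat ∈ Nat.primeFactorsList n.toNat := by
        rw [← List.count_pos_iff, ← Nat.primeFactorsList_count_eq] at *
        omega
      apply hv
      rw [hmem_pfn]
      exact ⟨v.toNat, hc, Int.toNat_of_nonneg (by omega)⟩
    refine ⟨?_, ?_, ?_, ?_, ?_⟩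
    · exact PySem.Dict.nodup_keys_foldl_insert_key _ _ _ _ hnd
    · exact Nat.pos_of_ne_zero (Nat.lcm_ne_zero hLne hNne)
    · intro v hv
      rcases (hmemkeys v).mp hv with hv' | hv'
      · exact hge2 v hv'
      · exact hge2_pfn v hv'
    · intro v hv
      rw [hgetD v]
      have h2v : 2 ≤ v := by
        rcases (hmemkeys v).mp hv with hv' | hv'
        · exact hge2 v hv'
        · exact hge2_pfn v hv'
      rw [hsup v.toNat]
      by_cases hvp : v ∈ PySem.Set.ofList pfn
      · rw [if_pos hvp]
        rw [PySem.Set.mem_ofList] at hvp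
        have hvcast : ((v.toNat : ℤ)) = v := Int.toNat_of_nonneg (by omega)
        have hcnt : (pfn.count v : Int) = ((n.toNat).factorization v.toNat : Int) := by
          conv_lhs => rw [← hvcast]
          rw [hcount v.toNat, Nat.primeFactorsList_count_eq]
        rw [hcnt]
        by_cases hvk : v ∈ p.keys
        · rw [hval v hvk]
          omega
        · have hcf : p.contains v = false := by
            rw [Bool.eq_false_iff]
            intro hc
            exact hvk ((PySem.Dict.contains_iff_mem_keys p v).mp hc)
          rw [PySem.Dict.getD_of_not_contains p 0 hcf]
          rw [hLfact0 v hvk h2v]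
          omega
      · rw [if_neg hvp]
        rw [PySem.Set.mem_ofList] at hvp
        have hvk : v ∈ p.keys := by
          rcases (hmemkeys v).mp hv with hv' | hv'
          · exact hv'
          · exact absurd hv' hvp
        rw [hval v hvk, hNfact0 v hvp h2v]
        omega
    · intro q
      have hpfu : (Nat.lcm L n.toNat).primeFactors = L.primeFactors ∪ (n.toNat).primeFactors := by
        rw [← Nat.support_factorization, hfactlcm, Finsupp.support_sup]
        simp
      rw [hpfu, Finset.mem_union, hmemkeys]
      constructor
      · rintro (hq | hq)
        · exact Or.inl ((hiff q).mp hq)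
        · refine Or.inr ?_
          rw [hmem_pfn]
          exact ⟨q, (hmemN q).mpr hq, rfl⟩
      · rintro (hq | hq)
        · exact Or.inl ((hiff q).mpr hq)
        · refine Or.inr ?_
          obtain ⟨q', hq', hcast⟩ := (hmem_pfn _).mp hq
          have : q' = q := by omega
          subst this
          exact (hmemN q').mp hq'

theorem outer_inv (nums : List Int) :
    ∀ (p : PySem.Dict Int Int) (L : ℕ), DInv p L →
      DInv (nums.foldl (fun p n =>
          (PySem.Dict.counter (primeFactorsA n)).items.foldl
            (fun p vc => p.insert vc.1 (max (p.getD vc.1 0) vc.2)) p) p)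
        (nums.foldl lstep L) := by
  induction nums with
  | nil => intro p L h; exact h
  | cons n t ih => intro p L h; exact ih _ _ (inner_preserves p L n h)

theorem res_fold (m : Int) (hm : m ≠ 0) :
    ∀ (items : List (Int × Int)), (∀ vc ∈ items, 1 ≤ vc.2) → items ≠ [] → ∀ (r : Int),
      items.foldl (fun res vc => PySem.Int.mod (res * modpow vc.1 vc.2 m) m) r
        = PySem.Int.mod (r * (items.map (fun vc => vc.1 ^ vc.2.toNat)).prod) m := by
  intro items
  induction items with
  | nil => intro _ hne; exact absurd rfl hne
  | cons x t ih =>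
    intro hpos _ r
    simp only [List.foldl_cons, List.map_cons, List.prod_cons]
    have hx : 1 ≤ x.2 := hpos x (by simp)
    have hmp : modpow x.1 x.2 m = PySem.Int.mod (x.1 ^ x.2.toNat) m := modpow_eq x.1 x.2 m hx hm
    by_cases ht : t = []
    · subst ht
      simp only [List.foldl_nil, List.map_nil, List.prod_nil]
      rw [hmp]
      apply pymod_congr hm
      have h1 : r * PySem.Int.mod (x.1 ^ x.2.toNat) m ≡ r * (x.1 ^ x.2.toNat) [ZMOD m] :=
        Int.ModEq.mul (Int.ModEq.refl r) (pymod_modEq _ m)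
      have h2 : r * (x.1 ^ x.2.toNat) = r * (x.1 ^ x.2.toNat * 1) := by ring
      rw [← h2]
      exact h1
    · rw [ih (fun vc hvc => hpos vc (by simp [hvc])) ht]
      apply pymod_congr hm
      have h1 : PySem.Int.mod (r * modpow x.1 x.2 m) m ≡ r * x.1 ^ x.2.toNat [ZMOD m] := by
        rw [hmp]
        exact (pymod_modEq _ m).trans (Int.ModEq.mul (Int.ModEq.refl r) (pymod_modEq _ m))
      have h2 : PySem.Int.mod (r * modpow x.1 x.2 m) m * (t.map (fun vc => vc.1 ^ vc.2.toNat)).prod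
          ≡ (r * x.1 ^ x.2.toNat) * (t.map (fun vc => vc.1 ^ vc.2.toNat)).prod [ZMOD m] :=
        Int.ModEq.mul h1 (Int.ModEq.refl _)
      have h3 : (r * x.1 ^ x.2.toNat) * (t.map (fun vc => vc.1 ^ vc.2.toNat)).prod
          = r * (x.1 ^ x.2.toNat * (t.map (fun vc => vc.1 ^ vc.2.toNat)).prod) := by ring
      rw [← h3]
      exact h2

theorem dinv_prod (p : PySem.Dict Int Int) (L : ℕ) (h : DInv p L) :
    (p.items.map (fun vc => vc.1 ^ vc.2.toNat)).prod = (L : Int) := by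
  obtain ⟨hnd, hL, hge2, hval, hiff⟩ := h
  have hLne : L ≠ 0 := by omega
  rw [PySem.Dict.items_eq_map_keys p hnd 0, List.map_map]
  have hcong : ∀ k ∈ p.keys,
      ((fun vc : Int × Int => vc.1 ^ vc.2.toNat) ∘ (fun k => (k, p.getD k 0))) k
        = ((fun q : ℕ => (q : Int)) ∘ (fun k : Int => k.toNat ^ L.factorization k.toNat)) k := by
    intro k hk
    have h2 : 2 ≤ k := hge2 k hk
    simp only [Function.comp_def]
    rw [hval k hk, Int.toNat_natCast]
    push_cast
    rw [Int.toNat_of_nonneg (by omega : (0:ℤ) ≤ k)]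
  rw [List.map_congr_left hcong]
  rw [show ((fun q : ℕ => (q : Int)) ∘ (fun k : Int => k.toNat ^ L.factorization k.toNat))
      = ((fun q : ℕ => (q : Int)) ∘ ((fun q : ℕ => q ^ L.factorization q) ∘ Int.toNat)) from rfl]
  rw [← Function.comp_assoc, ← List.map_map, ← List.map_map]
  rw [← Nat.cast_list_prod]
  have hnodupN : (p.keys.map Int.toNat).Nodup := by
    refine List.Nodup.map_on ?_ hnd
    intro x hx y hy hxy
    have := hge2 x hx
    have := hge2 y hy
    omega
  have hfin : (p.keys.map Int.toNat).toFinset = L.primeFactors := by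
    ext q
    rw [List.mem_toFinset, List.mem_map]
    constructor
    · rintro ⟨v, hv, rfl⟩
      have h2 := hge2 v hv
      refine (hiff v.toNat).mpr ?_
      rw [Int.toNat_of_nonneg (by omega)]
      exact hv
    · intro hq
      have := (hiff q).mp hq
      exact ⟨(q : Int), this, by omega⟩
  congr 1
  rw [← List.prod_toFinset _ hnodupN, hfin, ← Nat.support_factorization]
  exact Nat.prod_factorization_pow_eq_self hLne

theorem lfold_pos (nums : List Int) : ∀ L : ℕ, 0 < L → 0 < nums.foldl lstep L := by
  induction nums with
  | nil => intro L h; exact h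
  | cons n t ih =>
    intro L h
    refine ih _ ?_
    unfold lstep
    split_ifs with h1
    · exact Nat.pos_of_ne_zero (Nat.lcm_ne_zero (by omega) (by omega))
    · exact h

theorem lfold_dvd (nums : List Int) : ∀ L : ℕ, 0 < L → L ∣ nums.foldl lstep L := by
  induction nums with
  | nil => intro L _; exact dvd_rfl
  | cons n t ih =>
    intro L h
    have hstep : L ∣ lstep L n := by
      unfold lstep
      split_ifs
      · exact Nat.dvd_lcm_left _ _
      · exact dvd_rfl
    have hpos : 0 < lstep L n := by
      unfold lstep; split_ifs with h1
      · exact Nat.pos_of_ne_zero (Nat.lcm_ne_zero (by omega) (by omega))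
      · exact h
    exact hstep.trans (ih _ hpos)

theorem lfold_two_le (nums : List Int) (hex : ∃ n ∈ nums, 1 < n) :
    ∀ L : ℕ, 0 < L → 2 ≤ nums.foldl lstep L := by
  induction nums with
  | nil => simp at hex
  | cons n t ih =>
    intro L hL
    rcases hex with ⟨x, hx, hx1⟩
    rcases List.mem_cons.mp hx with rfl | hxt
    · have hstep : lstep L x = Nat.lcm L x.toNat := by unfold lstep; simp [hx1]
      have hpos : 0 < Nat.lcm L x.toNat :=
        Nat.pos_of_ne_zero (Nat.lcm_ne_zero (by omega) (by omega))
      have hdvd := lfold_dvd t (Nat.lcm L x.toNat) hpos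
      have hfpos := lfold_pos t (Nat.lcm L x.toNat) hpos
      have h2 : x.toNat ≤ Nat.lcm L x.toNat := Nat.le_of_dvd hpos (Nat.dvd_lcm_right _ _)
      have h3 := Nat.le_of_dvd hfpos hdvd
      simp only [List.foldl_cons, hstep]
      omega
    · have hpos : 0 < lstep L n := by
        unfold lstep; split_ifs with h1
        · exact Nat.pos_of_ne_zero (Nat.lcm_ne_zero (by omega) (by omega))
        · exact hL
      simpa using ih ⟨x, hxt, hx1⟩ (lstep L n) hpos

theorem lfold_const (nums : List Int) (hall : ∀ n ∈ nums, n ≤ 1) :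
    ∀ L : ℕ, nums.foldl lstep L = L := by
  induction nums with
  | nil => intro L; rfl
  | cons n t ih =>
    intro L
    have h1 : ¬ (1 < n) := by have := hall n (by simp); omega
    have hstep : lstep L n = L := by unfold lstep; simp [h1]
    simp only [List.foldl_cons, hstep]
    exact ih (fun x hx => hall x (by simp [hx])) L

theorem b_fold (nums : List Int) :
    ∀ L : ℕ, 0 < L →
      nums.foldl (fun l n => if 1 < n then PySem.Int.floordiv l (Int.gcd l n) * n else l) (L : Int)
        = ((nums.foldl lstep L : ℕ) : Int) := by
  induction nums with
  | nil => intro L _; rfl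
  | cons n t ih =>
    intro L hL
    simp only [List.foldl_cons]
    by_cases h1 : 1 < n
    · rw [if_pos h1]
      have hstep : PySem.Int.floordiv (L : Int) (Int.gcd (L : Int) n) * n
          = ((Nat.lcm L n.toNat : ℕ) : Int) := by
        have hg : Int.gcd (L : Int) n = Nat.gcd L n.toNat := by
          unfold Int.gcd
          have e1 : ((L : ℤ)).natAbs = L := by omega
          have e2 : n.natAbs = n.toNat := by omega
          rw [e1, e2]
        have hnn : ((n.toNat : ℕ) : ℤ) = n := Int.toNat_of_nonneg (by omega)
        have hdg : Nat.gcd L n.toNat ∣ L := Nat.gcd_dvd_left _ _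
        have hgpos : 0 < Nat.gcd L n.toNat := Nat.gcd_pos_of_pos_left _ hL
        have hlcm : L / Nat.gcd L n.toNat * n.toNat = Nat.lcm L n.toNat := by
          refine Nat.eq_of_mul_eq_mul_left hgpos ?_
          rw [← Nat.mul_assoc, Nat.mul_div_cancel' hdg, Nat.gcd_mul_lcm]
        rw [hg, PySem.Int.floordiv_natCast]
        calc ((L / Nat.gcd L n.toNat : ℕ) : ℤ) * n
            = ((L / Nat.gcd L n.toNat : ℕ) : ℤ) * ((n.toNat : ℕ) : ℤ) := by rw [hnn]
          _ = ((L / Nat.gcd L n.toNat * n.toNat : ℕ) : ℤ) := by push_cast; ring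
          _ = ((Nat.lcm L n.toNat : ℕ) : ℤ) := by rw [hlcm]
      rw [hstep]
      have hlpos : 0 < Nat.lcm L n.toNat :=
        Nat.pos_of_ne_zero (Nat.lcm_ne_zero (by omega) (by omega))
      rw [ih (Nat.lcm L n.toNat) hlpos]
      have : lstep L n = Nat.lcm L n.toNat := by unfold lstep; rw [if_pos h1]
      rw [this]
    · rw [if_neg h1]
      rw [ih L hL]
      have : lstep L n = L := by unfold lstep; rw [if_neg h1]
      rw [this]

theorem outer_const (nums : List Int) :
    (∀ n ∈ nums, n ≤ 1) → ∀ d : PySem.Dict Int Int,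
      nums.foldl (fun p n =>
        (PySem.Dict.counter (primeFactorsA n)).items.foldl
          (fun p vc => p.insert vc.1 (max (p.getD vc.1 0) vc.2)) p) d = d := by
  induction nums with
  | nil => intro _ d; rfl
  | cons n t ih =>
    intro hall d
    have hitems0 : (PySem.Dict.counter (primeFactorsA n)).items = [] := by
      have hpf : primeFactorsA n = [] := by
        rw [primeFactorsA_eq]
        have h1 := hall n (by simp)
        have hN : n.toNat = 0 ∨ n.toNat = 1 := by omega
        rcases hN with h0 | h0 <;> rw [h0] <;> simp
      rw [hpf]
      rfl
    simp only [List.foldl_cons, hitems0, List.foldl_nil]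
    exact ih (fun x hx => hall x (by simp [hx])) d

-- ===== VERDICT (by name: the statement is the Claim_ definition above) =====
theorem lcm_mod_spec : Claim_equal_lcm_mod := by
  unfold Claim_equal_lcm_mod
  intro nums m hdom hpre
  unfold Spec_lcm_mod
  have hA : lcm_mod nums m
      = ((nums.foldl (fun p n =>
            (PySem.Dict.counter (primeFactorsA n)).items.foldl
              (fun p vc => p.insert vc.1 (max (p.getD vc.1 0) vc.2)) p)
          PySem.Dict.empty).items.foldl
          (fun res vc => PySem.Int.mod (res * modpow vc.1 vc.2 m) m) 1) := rfl
  have hB : lcm_mod_alt nums m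
      = (if 1 < nums.foldl
            (fun l n => if 1 < n then PySem.Int.floordiv l (Int.gcd l n) * n else l) 1
          then PySem.Int.mod (nums.foldl
            (fun l n => if 1 < n then PySem.Int.floordiv l (Int.gcd l n) * n else l) 1) m
          else 1) := rfl
  rw [hA, hB]
  have hBfold : nums.foldl
      (fun l n => if 1 < n then PySem.Int.floordiv l (Int.gcd l n) * n else l) (1 : Int)
      = ((nums.foldl lstep 1 : ℕ) : Int) := by
    rw [show (1 : Int) = ((1 : ℕ) : ℤ) by norm_num]
    exact b_fold nums 1 one_pos
  by_cases hex : ∃ n ∈ nums, 1 < n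
  · have hm0 : m ≠ 0 := by
      rcases hpre with h | h
      · exact h
      · obtain ⟨n, hn, h1⟩ := hex
        have := h n hn
        omega
    have hInv0 : DInv PySem.Dict.empty 1 := by
      refine ⟨by simp, one_pos, by simp, by simp, ?_⟩
      intro q
      simp
    have hInv := outer_inv nums PySem.Dict.empty 1 hInv0
    have hK2 : 2 ≤ nums.foldl lstep 1 := lfold_two_le nums hex 1 one_pos
    obtain ⟨hnd, hKpos, hge2, hval, hiff⟩ := hInv
    have hne : (nums.foldl (fun p n =>
        (PySem.Dict.counter (primeFactorsA n)).items.foldl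
          (fun p vc => p.insert vc.1 (max (p.getD vc.1 0) vc.2)) p)
        PySem.Dict.empty).items ≠ [] := by
      intro hnil
      obtain ⟨q, hq⟩ := Nat.nonempty_primeFactors.mpr (by omega : 1 < nums.foldl lstep 1)
      have hmem := (hiff q).mp hq
      have : (nums.foldl (fun p n =>
          (PySem.Dict.counter (primeFactorsA n)).items.foldl
            (fun p vc => p.insert vc.1 (max (p.getD vc.1 0) vc.2)) p)
          PySem.Dict.empty).keys = [] := by
        simp only [PySem.Dict.keys, hnil]
        rfl
      rw [this] at hmem
      exact absurd hmem (List.not_mem_nil)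
    have hpos1 : ∀ vc ∈ (nums.foldl (fun p n =>
        (PySem.Dict.counter (primeFactorsA n)).items.foldl
          (fun p vc => p.insert vc.1 (max (p.getD vc.1 0) vc.2)) p)
        PySem.Dict.empty).items, 1 ≤ vc.2 := by
      intro vc hvc
      have hk : vc.1 ∈ (nums.foldl (fun p n =>
          (PySem.Dict.counter (primeFactorsA n)).items.foldl
            (fun p vc => p.insert vc.1 (max (p.getD vc.1 0) vc.2)) p)
          PySem.Dict.empty).keys := PySem.Dict.mem_keys_of_mem_items _ hvc
      have hv2 : 2 ≤ vc.1 := hge2 _ hk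
      have hvcval : (nums.foldl (fun p n =>
          (PySem.Dict.counter (primeFactorsA n)).items.foldl
            (fun p vc => p.insert vc.1 (max (p.getD vc.1 0) vc.2)) p)
          PySem.Dict.empty).getD vc.1 0 = vc.2 := by
        have h' : (vc.1, vc.2) ∈ (nums.foldl (fun p n =>
            (PySem.Dict.counter (primeFactorsA n)).items.foldl
              (fun p vc => p.insert vc.1 (max (p.getD vc.1 0) vc.2)) p)
            PySem.Dict.empty).items := hvc
        exact PySem.Dict.getD_of_mem_items _ h' hnd 0
      have hfpos : 0 < (nums.foldl lstep 1).factorization vc.1.toNat := by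
        have hmemf : vc.1.toNat ∈ (nums.foldl lstep 1).primeFactors := by
          refine (hiff vc.1.toNat).mpr ?_
          rw [Int.toNat_of_nonneg (by omega)]
          exact hk
        rw [← Nat.support_factorization] at hmemf
        have := Finsupp.mem_support_iff.mp hmemf
        omega
      have := hval vc.1 hk
      rw [hvcval] at this
      omega
    rw [res_fold m hm0 _ hpos1 hne 1]
    rw [dinv_prod _ _ ⟨hnd, hKpos, hge2, hval, hiff⟩]
    rw [hBfold, if_pos (by exact_mod_cast hK2 : (1:ℤ) < ((nums.foldl lstep 1 : ℕ) : ℤ))]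
    rw [one_mul]
  · have hall : ∀ n ∈ nums, n ≤ 1 := by
      intro n hn
      by_contra hc
      exact hex ⟨n, hn, by omega⟩
    rw [outer_const nums hall PySem.Dict.empty]
    rw [hBfold, lfold_const nums hall 1]
    norm_num
    rfl
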